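-- pv_equiv track=rewrite | github.com/Caijinling1/iAmyP | Amyloidogenesis Hexapeptide/Amyloidogenesis Hexapeptide/datasets/hydrophobicity/0_6.py | classify_sequence
-- ===== SOURCE A (Python) =====
-- def classify_sequence(row):
--     hydrophobic_residues = "EACYVILMFW"  # 疏水性残基
--     count = sum(row['sequence'].count(residue) for residue in hydrophobic_residues)
--
--     # 将疏水性残基的数量映射到0-6的范围，可以根据实际需求调整
--     if count == 0:
--         return 0
--     elif count == 1:
--         return 1
--     elif count == 2:
--         return 2
--     elif count == 3:
--         return 3
--     elif count == 4:
--         return 4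
--     elif count == 5:
--         return 5
--     else:
--         return 6
-- ===== SOURCE B (Python) =====
-- def classify_sequence(row):
--     hydrophobic = set("EACYVILMFW")
--     count = 0
--     for ch in row['sequence']:
--         if ch in hydrophobic:
--             count += 1
--     return min(count, 6)
-- ===== Notes on version B (the rewrite author's own statement) =====
-- stated objective: idiomatic
-- what changed: B makes one pass over the sequence testing each character against a set of hydrophobic residues and returns min(count, 6), instead of A's ten separate .count scans (one per residue) followed by a seven-branch if/elif ladder.
import Mathlib
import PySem

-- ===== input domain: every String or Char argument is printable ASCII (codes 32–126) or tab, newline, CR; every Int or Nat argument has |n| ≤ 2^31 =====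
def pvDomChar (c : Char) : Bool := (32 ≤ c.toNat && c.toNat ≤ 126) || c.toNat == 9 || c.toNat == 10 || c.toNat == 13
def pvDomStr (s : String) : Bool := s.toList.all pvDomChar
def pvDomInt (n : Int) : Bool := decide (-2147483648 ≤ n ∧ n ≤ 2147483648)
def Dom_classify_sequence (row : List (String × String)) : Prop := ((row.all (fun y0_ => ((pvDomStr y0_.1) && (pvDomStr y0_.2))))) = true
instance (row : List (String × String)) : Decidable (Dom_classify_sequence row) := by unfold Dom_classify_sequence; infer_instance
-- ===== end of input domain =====

-- B replaces A's ten per-residue .count scans and if/elif ladder by one pass over the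
-- sequence with a set membership test and min(count, 6) (objective: idiomatic).

-- ===== PORT A =====
-- row['sequence'] : first-match lookup in the association list (KeyError → none, excluded by Pre_)
def classify_sequence (row : List (String × String)) : Int :=
  match row.lookup "sequence" with
  | none => 0  -- unreachable under Pre_ (Python raises KeyError)
  | some seq =>
    let hydrophobic_residues : String := "EACYVILMFW"
    let count : Int :=
      (hydrophobic_residues.toList.map
        (fun residue => (PySem.Str.count seq (String.ofList [residue]) : Int))).sum
    if count = 0 then 0
    else if count = 1 then 1
    else if count = 2 then 2
    else if count = 3 then 3
    else if count = 4 then 4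
    else if count = 5 then 5
    else 6

-- ===== PORT B =====
def classify_sequence_alt (row : List (String × String)) : Int :=
  match row.lookup "sequence" with
  | none => 0  -- unreachable under Pre_ (Python raises KeyError)
  | some seq =>
    let hydrophobic : PySem.Set Char := PySem.Set.ofList "EACYVILMFW".toList
    let count : Int :=
      seq.toList.foldl (fun acc ch => if hydrophobic.contains ch then acc + 1 else acc) 0
    min count 6

-- ===== PRECONDITION & SPEC =====
-- Pre_ excludes exactly the rows without a "sequence" key, where Python A raises KeyError.
def Pre_classify_sequence (row : List (String × String)) : Prop :=
  (row.lookup "sequence").isSome = true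
instance (row : List (String × String)) : Decidable (Pre_classify_sequence row) := by
  unfold Pre_classify_sequence; infer_instance
def pvWitness_classify_sequence : (List (String × String)) := [("sequence", "AKLV")]

def Spec_classify_sequence (row : List (String × String)) (out : Int) : Prop := out = classify_sequence_alt row
instance (row : List (String × String)) (out : Int) : Decidable (Spec_classify_sequence row out) := by unfold Spec_classify_sequence; infer_instance

-- ===== CLAIM (what is proved, stated in full; the proofs are below) =====
def Claim_equal_classify_sequence : Prop := ∀ (row : List (String × String)), Dom_classify_sequence row → Pre_classify_sequence row → Spec_classify_sequence row (classify_sequence row)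

-- ===== LEMMAS AND PROOFS =====

-- count.go for a single-character needle counts occurrences of that character.
theorem count_go_single (c : Char) (fuel : Nat) :
    ∀ (s : List Char) (acc : Nat), s.length ≤ fuel →
      PySem.Chars.count.go [c] fuel s acc = acc + s.count c := by
  induction fuel with
  | zero =>
    intro s acc h
    cases s with
    | nil => simp [PySem.Chars.count.go]
    | cons x t => simp at h
  | succ n ih =>
    intro s acc h
    cases s with
    | nil => simp [PySem.Chars.count.go]
    | cons x t =>
      by_cases hc : c = x
      · subst hc
        rw [PySem.Chars.count.go]
        simp only [List.isPrefixOf, BEq.rfl, Bool.and_eq_true, and_true]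
        simp only [List.length, List.drop] at h ⊢
        rw [ih t (acc + 1) (by omega)]
        simp
        omega
      · rw [PySem.Chars.count.go]
        have : ([c].isPrefixOf (x :: t)) = false := by
          simp [List.isPrefixOf]
          exact hc
        rw [this]
        simp only [Bool.false_eq_true, if_false]
        simp only [List.length_cons] at h
        rw [ih t acc (by omega)]
        simp [List.count_cons]
        exact fun h => hc h.symm

-- Python s.count(c) for a single character c is list count.
theorem str_count_single (seq : String) (c : Char) :
    PySem.Str.count seq (String.ofList [c]) = seq.toList.count c := by
  have h : PySem.Chars.count seq.toList [c] = seq.toList.count c := by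
    rw [PySem.Chars.count]
    simp only [List.isEmpty, Bool.false_eq_true, if_false]
    simpa using count_go_single c seq.toList.length seq.toList 0 (le_refl _)
  simpa using h

-- a 0/1-indicator sum over a list is that list's count
theorem sum_indicator (x : Char) (RS : List Char) :
    (RS.map (fun r => if x = r then (1 : Int) else 0)).sum = (RS.count x : Int) := by
  induction RS with
  | nil => simp
  | cons y ys ihy =>
    by_cases hxy : x = y
    · subst hxy
      simp [ihy]
      omega
    · simp only [List.map_cons, List.sum_cons, if_neg hxy, zero_add, ihy, List.count_cons]
      simp [Ne.symm hxy]

-- summing per-residue character counts over a duplicate-free residue list is one countP pass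
theorem sum_count_eq_countP (RS : List Char) (hnd : RS.Nodup) (cs : List Char) :
    (RS.map (fun r => (cs.count r : Int))).sum = (cs.countP (fun c => c ∈ RS) : Int) := by
  induction cs with
  | nil => simp
  | cons x t ih =>
    have hsplit : (RS.map (fun r => ((x :: t).count r : Int))).sum
        = (RS.map (fun r => (t.count r : Int))).sum
          + (RS.map (fun r => if x = r then (1 : Int) else 0)).sum := by
      rw [← List.sum_map_add]
      congr 1
      apply List.map_congr_left
      intro r _
      by_cases hx : x = r
      · simp [hx]
      · simp [hx]
    have hcnt : (RS.count x : Int) = if x ∈ RS then 1 else 0 := by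
      by_cases hx : x ∈ RS
      · simp [hx, List.count_eq_one_of_mem hnd hx]
      · simp [hx, List.count_eq_zero_of_not_mem hx]
    rw [hsplit, ih, sum_indicator, hcnt, List.countP_cons]
    by_cases hx : x ∈ RS <;> simp [hx]

-- A's if/elif ladder is min(·, 6) on nonnegative integers
theorem ladder_eq_min (n : Nat) :
    (if (n : Int) = 0 then (0 : Int)
     else if (n : Int) = 1 then 1
     else if (n : Int) = 2 then 2
     else if (n : Int) = 3 then 3
     else if (n : Int) = 4 then 4
     else if (n : Int) = 5 then 5
     else 6) = min ((n : Int)) 6 := by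
  split_ifs <;> omega

-- ===== VERDICT (by name: the statement is the Claim_ definition above) =====
theorem classify_sequence_spec : Claim_equal_classify_sequence := by
  intro row _hdom hpre
  unfold Spec_classify_sequence classify_sequence classify_sequence_alt
  cases hlk : row.lookup "sequence" with
  | none => rfl
  | some seq =>
    simp only
    have hnd : ("EACYVILMFW".toList).Nodup := by decide
    have hA : ("EACYVILMFW".toList.map
        (fun residue => (PySem.Str.count seq (String.ofList [residue]) : Int))).sum
        = (seq.toList.countP (fun c => c ∈ "EACYVILMFW".toList) : Int) := by
      have := sum_count_eq_countP "EACYVILMFW".toList hnd seq.toList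
      rw [← this]
      congr 1
      apply List.map_congr_left
      intro r _
      rw [str_count_single]
    have hB : seq.toList.foldl
        (fun acc ch => if (PySem.Set.ofList "EACYVILMFW".toList).contains ch then acc + 1 else acc)
        (0 : Int)
        = (seq.toList.countP
            (fun ch => (PySem.Set.ofList "EACYVILMFW".toList).contains ch) : Int) := by
      simpa using PySem.List.foldl_if_add_one
        (fun ch => (PySem.Set.ofList "EACYVILMFW".toList).contains ch) seq.toList 0
    have hp : (fun ch => (PySem.Set.ofList "EACYVILMFW".toList).contains ch)
        = (fun c => decide (c ∈ "EACYVILMFW".toList)) := by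
      funext c
      simp [PySem.Set.mem_ofList]
    rw [hA, hB, hp]
    exact ladder_eq_min _
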